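-- pv_equiv track=rewrite | github.com/rodrigueswilson/lesson-plan-browser | tools/docx_parser/content_sections.py | extract_by_heading
-- ===== SOURCE A (Python) =====
-- from typing import Any, Callable, Dict, List, Optional
--
-- def extract_by_heading(
--     paragraphs: List[str], heading_text: str, case_sensitive: bool = False
-- ) -> List[str]:
--     """Extract content following a specific heading."""
--     content = []
--     found_heading = False
--     for para in paragraphs:
--         if not case_sensitive:
--             match = heading_text.lower() in para.lower()
--         else:
--             match = heading_text in para
--         if match and len(para) < 100:
--             found_heading = True
--             continue
--         if found_heading:
--             if len(para) < 50 and para.isupper():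
--                 break
--             content.append(para)
--     return content
-- ===== SOURCE B (Python) =====
-- def extract_by_heading(paragraphs, heading_text, case_sensitive=False):
--     """Extract content following a specific heading (index/slice based, staged passes)."""
--     needle = heading_text if case_sensitive else heading_text.lower()
--
--     def is_heading(p):
--         return needle in (p if case_sensitive else p.lower()) and len(p) < 100
--
--     h = next((i for i, p in enumerate(paragraphs) if is_heading(p)), None)
--     if h is None:
--         return []
--     tail = paragraphs[h + 1:]
--     stop = next((j for j, p in enumerate(tail)
--                  if not is_heading(p) and len(p) < 50 and p.isupper()), len(tail))
--     return [p for p in tail[:stop] if not is_heading(p)]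
-- ===== Notes on version B (the rewrite author's own statement) =====
-- stated objective: alternative
-- what changed: Replaces A's single flag-carrying loop with conditional append/continue/break by a staged index computation: find the index of the first short matching heading, slice off the tail, find the stop index of the first non-heading short all-caps terminator, and return a filter comprehension over the slice before it.
import Mathlib
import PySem

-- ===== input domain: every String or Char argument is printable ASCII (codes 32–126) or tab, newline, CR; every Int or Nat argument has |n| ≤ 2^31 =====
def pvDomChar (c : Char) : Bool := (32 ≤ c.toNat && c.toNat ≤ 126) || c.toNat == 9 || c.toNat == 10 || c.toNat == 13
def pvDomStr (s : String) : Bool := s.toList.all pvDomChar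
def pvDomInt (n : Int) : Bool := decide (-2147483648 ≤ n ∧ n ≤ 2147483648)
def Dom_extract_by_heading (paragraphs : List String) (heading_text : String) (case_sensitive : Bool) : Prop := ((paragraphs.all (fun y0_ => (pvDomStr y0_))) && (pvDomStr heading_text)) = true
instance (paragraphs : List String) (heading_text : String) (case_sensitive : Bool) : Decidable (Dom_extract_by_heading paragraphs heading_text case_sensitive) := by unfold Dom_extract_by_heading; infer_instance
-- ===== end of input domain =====

-- B replaces A's single flag-carrying loop by staged index computations over the list:
-- heading index, tail slice, stop index, then a filter over the slice before it (alternative; same cost).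

-- Python str.isupper(): at least one cased character and no lowercase one.
-- Exact on the ASCII domain (cased = a-z/A-Z there); ported by hand, PySem has only the char-level predicate.
def pvStrIsupper (s : String) : Bool :=
  s.toList.any PySem.Chars.isupper && s.toList.all (fun c => !PySem.Chars.islower c)

-- ===== PORT A =====
-- the loop body of A: state = found_heading flag; returning [] at the break ends the accumulation
def pvGoA (heading_text : String) (case_sensitive : Bool) : List String → Bool → List String
  | [], _ => []
  | p :: rest, found =>
    let m := if !case_sensitive then PySem.Str.isIn (PySem.Str.lower heading_text) (PySem.Str.lower p)
             else PySem.Str.isIn heading_text p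
    if m && PySem.Str.len p < 100 then pvGoA heading_text case_sensitive rest true
    else if found then
      if PySem.Str.len p < 50 && pvStrIsupper p then []
      else p :: pvGoA heading_text case_sensitive rest found
    else pvGoA heading_text case_sensitive rest found

def extract_by_heading (paragraphs : List String) (heading_text : String) (case_sensitive : Bool) : List String :=
  pvGoA heading_text case_sensitive paragraphs false

-- ===== PORT B =====
-- is_heading(p): needle is the pre-folded heading text
def pvIsHeading (needle : String) (case_sensitive : Bool) (p : String) : Bool :=
  PySem.Str.isIn needle (if case_sensitive then p else PySem.Str.lower p) && PySem.Str.len p < 100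

-- next((i for i, p in enumerate(l) if is_heading(p)), None): the accumulator is enumerate's counter
def pvFindHeadingIdx (needle : String) (case_sensitive : Bool) : List String → Nat → Option Nat
  | [], _ => none
  | p :: rest, i => if pvIsHeading needle case_sensitive p then some i
                    else pvFindHeadingIdx needle case_sensitive rest (i + 1)

-- next((j for j, p in enumerate(tail) if not is_heading(p) and len(p)<50 and p.isupper()), len(tail))
def pvStopIdx (needle : String) (case_sensitive : Bool) : List String → Nat
  | [] => 0
  | p :: rest =>
    if !pvIsHeading needle case_sensitive p && (PySem.Str.len p < 50 && pvStrIsupper p) then 0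
    else 1 + pvStopIdx needle case_sensitive rest

def extract_by_heading_alt (paragraphs : List String) (heading_text : String) (case_sensitive : Bool) : List String :=
  let needle := if case_sensitive then heading_text else PySem.Str.lower heading_text
  match pvFindHeadingIdx needle case_sensitive paragraphs 0 with
  | none => []
  | some h =>
    -- paragraphs[h + 1:] with h ≥ 0: slicing from a nonnegative index = List.drop
    let tail := paragraphs.drop (h + 1)
    let stop := pvStopIdx needle case_sensitive tail
    -- [p for p in tail[:stop] if not is_heading(p)]
    (tail.take stop).filter (fun p => !pvIsHeading needle case_sensitive p)

-- ===== PRECONDITION & SPEC =====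
def Spec_extract_by_heading (paragraphs : List String) (heading_text : String) (case_sensitive : Bool) (out : List String) : Prop := out = extract_by_heading_alt paragraphs heading_text case_sensitive
instance (paragraphs : List String) (heading_text : String) (case_sensitive : Bool) (out : List String) : Decidable (Spec_extract_by_heading paragraphs heading_text case_sensitive out) := by unfold Spec_extract_by_heading; infer_instance

-- ===== CLAIM (what is proved, stated in full; the proofs are below) =====
def Claim_equal_extract_by_heading : Prop := ∀ (paragraphs : List String) (heading_text : String) (case_sensitive : Bool), Dom_extract_by_heading paragraphs heading_text case_sensitive → Spec_extract_by_heading paragraphs heading_text case_sensitive (extract_by_heading paragraphs heading_text case_sensitive)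

-- ===== LEMMAS AND PROOFS =====

-- A's cons step, with its match test rewritten as B's is_heading on the pre-folded needle
theorem pvGoA_cons (ht p : String) (cs found : Bool) (rest : List String) :
    pvGoA ht cs (p :: rest) found
      = (if pvIsHeading (if cs then ht else PySem.Str.lower ht) cs p then
           pvGoA ht cs rest true
         else if found then
           (if PySem.Str.len p < 50 && pvStrIsupper p then []
            else p :: pvGoA ht cs rest found)
         else pvGoA ht cs rest found) := by
  cases cs <;> simp [pvGoA, pvIsHeading]

-- once the flag is set, A's loop computes B's take-stop-then-filter phase
theorem pvGoA_true (ht : String) (cs : Bool) (l : List String) :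
    pvGoA ht cs l true
      = (l.take (pvStopIdx (if cs then ht else PySem.Str.lower ht) cs l)).filter
          (fun p => !pvIsHeading (if cs then ht else PySem.Str.lower ht) cs p) := by
  induction l with
  | nil => cases cs <;> rfl
  | cons p rest ih =>
    rw [pvGoA_cons]
    simp only [pvStopIdx]
    by_cases hh : pvIsHeading (if cs then ht else PySem.Str.lower ht) cs p
    · simp [hh, Nat.add_comm 1, ih]
    · by_cases hu : p.length < 50 ∧ pvStrIsupper p = true
      · simp [hh, hu]
      · simp [hh, hu, Nat.add_comm 1, ih]

-- the enumerate counter only shifts the found index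
theorem pvFindHeadingIdx_shift (needle : String) (cs : Bool) (m : List String) (i : Nat) :
    pvFindHeadingIdx needle cs m (i + 1)
      = (pvFindHeadingIdx needle cs m i).map (· + 1) := by
  induction m generalizing i with
  | nil => rfl
  | cons q mrest mih =>
    simp only [pvFindHeadingIdx]
    split_ifs <;> simp [mih]

-- before the flag is set, A's loop is B's whole staged computation
theorem pvGoA_false (ht : String) (cs : Bool) (l : List String) :
    pvGoA ht cs l false = extract_by_heading_alt l ht cs := by
  induction l with
  | nil => cases cs <;> rfl
  | cons p rest ih =>
    rw [pvGoA_cons]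
    simp only [extract_by_heading_alt, pvFindHeadingIdx] at *
    by_cases hh : pvIsHeading (if cs then ht else PySem.Str.lower ht) cs p
    · simp [hh, pvGoA_true]
    · rw [if_neg hh, ih, if_neg hh, pvFindHeadingIdx_shift]
      cases pvFindHeadingIdx (if cs then ht else PySem.Str.lower ht) cs rest 0 <;> simp

-- ===== VERDICT (by name: the statement is the Claim_ definition above) =====
theorem extract_by_heading_spec : Claim_equal_extract_by_heading := by
  intro paragraphs heading_text case_sensitive _
  unfold Spec_extract_by_heading extract_by_heading
  exact pvGoA_false heading_text case_sensitive paragraphs
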